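-- pv_equiv track=rewrite | github.com/pypi-data/pypi-mirror-403 | packages/pkglink/pkglink-1.1.0-py3-none-any.whl/pkglink/config.py | _collect_duplicates
-- ===== SOURCE A (Python) =====
-- from collections.abc import Iterable
--
-- def _collect_duplicates(
--     pairs: Iterable[tuple[str, str | None]],
-- ) -> dict[str, list[str]]:
--     registry: dict[str, list[str]] = {}
--     for entry_name, value in pairs:
--         if not value:
--             continue
--         if value not in registry:
--             registry[value] = [entry_name]
--         else:
--             registry[value].append(entry_name)
--     return {value: entries for value, entries in registry.items() if len(entries) > 1}
-- ===== SOURCE B (Python) =====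
-- def _collect_duplicates(pairs):
--     pair_list = list(pairs)
--     counts = {}
--     for _, value in pair_list:
--         if value:
--             counts[value] = counts.get(value, 0) + 1
--     result = {}
--     for entry_name, value in pair_list:
--         if value and counts[value] > 1:
--             result.setdefault(value, []).append(entry_name)
--     return result
-- ===== Notes on version B (the rewrite author's own statement) =====
-- stated objective: alternative
-- what changed: Replaces A's single grouping pass followed by a length-based dict-comprehension filter with two passes: a count table over truthy values, then a direct build pass that only ever inserts entries whose value is known to be duplicated, so no post-filter is needed.
import Mathlib
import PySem

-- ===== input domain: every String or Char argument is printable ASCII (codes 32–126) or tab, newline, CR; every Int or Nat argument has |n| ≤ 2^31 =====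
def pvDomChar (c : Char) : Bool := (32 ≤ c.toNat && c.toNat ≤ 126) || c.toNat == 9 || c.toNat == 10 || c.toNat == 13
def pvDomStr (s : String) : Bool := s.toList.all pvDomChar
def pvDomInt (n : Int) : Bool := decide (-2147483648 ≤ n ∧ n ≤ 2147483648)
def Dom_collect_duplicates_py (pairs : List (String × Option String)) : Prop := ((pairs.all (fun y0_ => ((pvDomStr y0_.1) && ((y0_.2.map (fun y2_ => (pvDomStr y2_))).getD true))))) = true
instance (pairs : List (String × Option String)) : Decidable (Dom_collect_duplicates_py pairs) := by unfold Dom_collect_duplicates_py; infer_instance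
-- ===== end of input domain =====

-- B builds a count table of the truthy values first and then inserts only entries of duplicated
-- values, instead of A's full grouping pass followed by a length-based post-filter (alternative
-- decomposition, same cost).

-- ===== PORT A =====
-- loop body of A's single pass: skip falsy values, start or extend the group
def pvAstep (d : PySem.Dict String (List String)) (p : String × Option String) : PySem.Dict String (List String) :=
  match p.2 with
  | none => d                                           -- if not value: continue
  | some s =>
    if s = "" then d                                    -- if not value: continue
    else if !(d.contains s) then d.insert s [p.1]       -- registry[value] = [entry_name]
    else d.modify s [] (fun x => x ++ [p.1])            -- registry[value].append(entry_name)

def collect_duplicates_py (pairs : List (String × Option String)) : List (String × List String) :=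
  -- {value: entries for value, entries in registry.items() if len(entries) > 1}
  ((pairs.foldl pvAstep PySem.Dict.empty).items).filter (fun q => q.2.length > 1)

-- ===== PORT B =====
-- first pass: counts[value] = counts.get(value, 0) + 1 (truthy values only)
def pvBcountStep (d : PySem.Dict String Int) (p : String × Option String) : PySem.Dict String Int :=
  match p.2 with
  | none => d
  | some s => if s = "" then d else d.insert s (d.getD s 0 + 1)

-- second pass: result.setdefault(value, []).append(entry_name) when counts[value] > 1
def pvBbuildStep (counts : PySem.Dict String Int) (d : PySem.Dict String (List String))
    (p : String × Option String) : PySem.Dict String (List String) :=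
  match p.2 with
  | none => d
  | some s =>
    if s = "" then d
    else if counts.getD s 0 > 1 then (d.setdefault s []).modify s [] (fun x => x ++ [p.1])
    else d

def collect_duplicates_py_alt (pairs : List (String × Option String)) : List (String × List String) :=
  (pairs.foldl (pvBbuildStep (pairs.foldl pvBcountStep PySem.Dict.empty)) PySem.Dict.empty).items

-- ===== PRECONDITION & SPEC =====
def Spec_collect_duplicates_py (pairs : List (String × Option String)) (out : List (String × List String)) : Prop := out = collect_duplicates_py_alt pairs
instance (pairs : List (String × Option String)) (out : List (String × List String)) : Decidable (Spec_collect_duplicates_py pairs out) := by unfold Spec_collect_duplicates_py; infer_instance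

-- ===== CLAIM (what is proved, stated in full; the proofs are below) =====
def Claim_equal_collect_duplicates_py : Prop := ∀ (pairs : List (String × Option String)), Dom_collect_duplicates_py pairs → Spec_collect_duplicates_py pairs (collect_duplicates_py pairs)

-- ===== LEMMAS AND PROOFS =====

-- (value, name) list of the truthy pairs
def pvTP (pairs : List (String × Option String)) : List (String × String) :=
  pairs.filterMap (fun p =>
    match p.2 with
    | none => none
    | some s => if s = "" then none else some (s, p.1))

def pvGather (l : List (String × String)) (k : String) : List String :=
  (l.filter (fun q => q.1 == k)).map (·.2)

-- on a truthy pair both branches of A's step are one dict `modify`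
theorem pvStepA_eq (d : PySem.Dict String (List String)) (s n : String) :
    (if !(d.contains s) then d.insert s [n] else d.modify s [] (fun x => x ++ [n]))
    = d.modify s [] (fun x => x ++ [n]) := by
  by_cases h : d.contains s = true
  · simp [h]
  · have h' : d.contains s = false := by simpa using h
    simp [h', PySem.Dict.modify, PySem.Dict.getD_of_not_contains d ([] : List String) h']

-- setdefault-then-append is the same dict `modify`
theorem pvStepB_eq (d : PySem.Dict String (List String)) (s n : String) :
    (d.setdefault s []).modify s [] (fun x => x ++ [n]) = d.modify s [] (fun x => x ++ [n]) := by
  by_cases h : d.contains s = true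
  · rw [PySem.Dict.setdefault_of_contains d [] h]
  · have h' : d.contains s = false := by simpa using h
    rw [PySem.Dict.setdefault_of_not_contains d [] h']
    simp [PySem.Dict.modify, PySem.Dict.getD_insert_self,
      PySem.Dict.getD_of_not_contains d ([] : List String) h', PySem.Dict.insert_insert_self]

-- A's registry fold is the grouping fold over the truthy pairs
theorem pvFoldA (pairs : List (String × Option String)) (d : PySem.Dict String (List String)) :
    pairs.foldl pvAstep d
    = (pvTP pairs).foldl (fun d q => d.modify q.1 [] (fun x => x ++ [q.2])) d := by
  induction pairs generalizing d with
  | nil => rfl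
  | cons p rest ih =>
    rw [List.foldl_cons]
    cases hv : p.2 with
    | none =>
      have h1 : pvAstep d p = d := by simp [pvAstep, hv]
      have h2 : pvTP (p :: rest) = pvTP rest := by simp [pvTP, hv]
      rw [h1, h2]; exact ih d
    | some s =>
      by_cases hs : s = ""
      · have h1 : pvAstep d p = d := by simp [pvAstep, hv, hs]
        have h2 : pvTP (p :: rest) = pvTP rest := by simp [pvTP, hv, hs]
        rw [h1, h2]; exact ih d
      · have h1 : pvAstep d p = d.modify s [] (fun x => x ++ [p.1]) := by
          simp only [pvAstep, hv]; rw [if_neg hs, pvStepA_eq]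
        have h2 : pvTP (p :: rest) = (s, p.1) :: pvTP rest := by simp [pvTP, hv, hs]
        rw [h1, h2, List.foldl_cons]; exact ih _

-- B's count fold is the counting fold over the truthy values
theorem pvFoldC (pairs : List (String × Option String)) (d : PySem.Dict String Int) :
    pairs.foldl pvBcountStep d
    = ((pvTP pairs).map (·.1)).foldl (fun d x => d.insert x (d.getD x 0 + 1)) d := by
  induction pairs generalizing d with
  | nil => rfl
  | cons p rest ih =>
    rw [List.foldl_cons]
    cases hv : p.2 with
    | none =>
      have h1 : pvBcountStep d p = d := by simp [pvBcountStep, hv]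
      have h2 : pvTP (p :: rest) = pvTP rest := by simp [pvTP, hv]
      rw [h1, h2]; exact ih d
    | some s =>
      by_cases hs : s = ""
      · have h1 : pvBcountStep d p = d := by simp [pvBcountStep, hv, hs]
        have h2 : pvTP (p :: rest) = pvTP rest := by simp [pvTP, hv, hs]
        rw [h1, h2]; exact ih d
      · have h1 : pvBcountStep d p = d.insert s (d.getD s 0 + 1) := by simp [pvBcountStep, hv, hs]
        have h2 : pvTP (p :: rest) = (s, p.1) :: pvTP rest := by simp [pvTP, hv, hs]
        rw [h1, h2, List.map_cons, List.foldl_cons]; exact ih _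

-- B's build fold is the grouping fold over the truthy pairs whose value is duplicated
theorem pvFoldB (pairs : List (String × Option String)) (c : PySem.Dict String Int)
    (d : PySem.Dict String (List String)) :
    pairs.foldl (pvBbuildStep c) d
    = ((pvTP pairs).filter (fun q => c.getD q.1 0 > 1)).foldl
        (fun d q => d.modify q.1 [] (fun x => x ++ [q.2])) d := by
  induction pairs generalizing d with
  | nil => rfl
  | cons p rest ih =>
    rw [List.foldl_cons]
    cases hv : p.2 with
    | none =>
      have h1 : pvBbuildStep c d p = d := by simp [pvBbuildStep, hv]
      have h2 : pvTP (p :: rest) = pvTP rest := by simp [pvTP, hv]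
      rw [h1, h2]; exact ih d
    | some s =>
      by_cases hs : s = ""
      · have h1 : pvBbuildStep c d p = d := by simp [pvBbuildStep, hv, hs]
        have h2 : pvTP (p :: rest) = pvTP rest := by simp [pvTP, hv, hs]
        rw [h1, h2]; exact ih d
      · have h2 : pvTP (p :: rest) = (s, p.1) :: pvTP rest := by simp [pvTP, hv, hs]
        by_cases hc : c.getD s 0 > 1
        · have h1 : pvBbuildStep c d p = d.modify s [] (fun x => x ++ [p.1]) := by
            simp only [pvBbuildStep, hv]; rw [if_neg hs, if_pos hc, pvStepB_eq]
          rw [h1, h2, List.filter_cons_of_pos (by simpa using hc), List.foldl_cons]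
          exact ih _
        · have h1 : pvBbuildStep c d p = d := by simp [pvBbuildStep, hv, hs, hc]
          rw [h1, h2, List.filter_cons_of_neg (by simpa using hc)]
          exact ih d

-- characterization of the grouping fold's items
theorem pvItemsG (l : List (String × String)) :
    (l.foldl (fun d q => d.modify q.1 [] (fun x => x ++ [q.2])) PySem.Dict.empty).items
    = (PySem.Set.ofList (l.map (·.1))).map (fun k => (k, pvGather l k)) := by
  have hnd : (l.foldl (fun d q => d.modify q.1 [] (fun x => x ++ [q.2])) PySem.Dict.empty).keys.Nodup := by
    simpa using PySem.Dict.nodup_keys_foldl_modify_key l (·.1) [] (fun _ q x => x ++ [q.2])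
      PySem.Dict.empty (by simp)
  have hkeys : (l.foldl (fun d q => d.modify q.1 [] (fun x => x ++ [q.2])) PySem.Dict.empty).keys
      = PySem.Set.ofList (l.map (·.1)) := by
    simpa [PySem.Set.update_nil_left] using
      PySem.Dict.keys_foldl_modify_key l (·.1) [] (fun _ q x => x ++ [q.2]) PySem.Dict.empty
  rw [PySem.Dict.items_eq_map_keys _ hnd [], hkeys]
  refine List.map_congr_left (fun k _ => ?_)
  rw [PySem.Dict.getD_foldl_modify_append l PySem.Dict.empty k]
  simp [pvGather, PySem.Dict.getD_empty]

-- set(filter) = filter(set)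
theorem pvOfListFilter (p : String → Bool) (xs : List String) :
    PySem.Set.ofList (xs.filter p) = (PySem.Set.ofList xs).filter p := by
  induction xs using List.reverseRecOn with
  | nil => rfl
  | append_singleton xs x ih =>
    rw [List.filter_append, PySem.Set.ofList_append_singleton]
    by_cases hx : p x = true
    · have hfx : List.filter p [x] = [x] := by simp [hx]
      rw [hfx, PySem.Set.ofList_append_singleton, ih]
      by_cases hm : x ∈ PySem.Set.ofList xs
      · have hmf : x ∈ List.filter p (PySem.Set.ofList xs) := List.mem_filter.mpr ⟨hm, hx⟩
        rw [PySem.Set.add_of_mem hmf, PySem.Set.add_of_mem hm]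
      · have hmf : x ∉ List.filter p (PySem.Set.ofList xs) := fun h => hm (List.mem_filter.mp h).1
        rw [PySem.Set.add_of_not_mem hmf, PySem.Set.add_of_not_mem hm, List.filter_append]
        simp [hx]
    · have hx' : p x = false := by simpa using hx
      have hfx : List.filter p [x] = [] := by simp [hx']
      rw [hfx, List.append_nil, ih]
      by_cases hm : x ∈ PySem.Set.ofList xs
      · rw [PySem.Set.add_of_mem hm]
      · rw [PySem.Set.add_of_not_mem hm, List.filter_append]
        simp [hx']

-- the group of k has as many entries as k occurs among the truthy values
theorem pvGatherLen (l : List (String × String)) (k : String) :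
    (pvGather l k).length = (l.map (·.1)).count k := by
  simp only [pvGather, List.length_map, List.count_eq_countP, List.countP_eq_length_filter]
  rw [List.filter_map, List.length_map]
  have hp : ((fun x => x == k) ∘ fun x : String × String => x.1) = fun q : String × String => q.1 == k := by
    funext q; simp [Function.comp]
  rw [hp]

-- ===== VERDICT (by name: the statement is the Claim_ definition above) =====
theorem collect_duplicates_py_spec : Claim_equal_collect_duplicates_py := by
  intro pairs _
  unfold Spec_collect_duplicates_py collect_duplicates_py collect_duplicates_py_alt
  rw [pvFoldA, pvFoldC, pvFoldB, PySem.Dict.foldl_insert_getD_add_one_eq_counter]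
  set l := pvTP pairs with hl
  set vals := l.map (·.1) with hvals
  have hBfilter : l.filter (fun q => (PySem.Dict.counter vals).getD q.1 0 > 1)
      = l.filter (fun q => (vals.count q.1 : Int) > 1) :=
    List.filter_congr (fun q _ => by rw [PySem.Dict.getD_counter])
  rw [hBfilter, pvItemsG, pvItemsG, List.filter_map]
  have hA : (PySem.Set.ofList vals).filter
        ((fun q : String × List String => decide (q.2.length > 1)) ∘ (fun k => (k, pvGather l k)))
      = (PySem.Set.ofList vals).filter (fun k => decide ((vals.count k : Int) > 1)) := by
    refine List.filter_congr (fun k _ => ?_)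
    simp only [Function.comp]
    rw [decide_eq_decide]
    rw [pvGatherLen]
    exact_mod_cast Iff.rfl
  rw [hA]
  have hmap : (l.filter (fun q => (vals.count q.1 : Int) > 1)).map (·.1)
      = vals.filter (fun v => (vals.count v : Int) > 1) := by
    rw [hvals, List.filter_map]
    have hp : ((fun v => decide ((vals.count v : Int) > 1)) ∘ fun x : String × String => x.1)
        = fun q : String × String => decide ((vals.count q.1 : Int) > 1) := by
      funext q; simp [Function.comp]
    rw [hp]
  rw [hmap, pvOfListFilter]
  refine (List.map_congr_left (fun k hk => ?_)).symm
  have hk2 : (vals.count k : Int) > 1 := by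
    have := (List.mem_filter.mp hk).2
    simpa using this
  congr 1
  unfold pvGather
  rw [List.filter_filter]
  congr 1
  refine List.filter_congr (fun q _ => ?_)
  by_cases hq : q.1 = k
  · simp [hq, hk2]
  · simp [hq]
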